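-- pv_equiv track=rewrite | github.com/iluha1204/Implementation-of-algorithms-in-python | BnB/BnB_sync.py | getJobsString
-- ===== SOURCE A (Python) =====
-- import bisect
--
-- def getJobsAsString(jobs):
--     jobs_as_string = '['
--     is_first_job = True
--     for job in jobs:
--         if is_first_job:
--             jobs_as_string += str(job['time']) + '(' + str(job['index']) + ')'
--             is_first_job = False
--         else:
--             jobs_as_string += ', ' + str(job['time']) + '(' + str(job['index']) + ')'
--     if jobs_as_string == '[':
--         jobs_as_string += 'No jobs'
--     jobs_as_string += ']'
--     return jobs_as_string
--
-- def getJobsString(j):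
--     jobs = []
--     index = 1
--     sumOfAllJobs = 0
--     for i in range(1, j+1):
--         time = 1
--         bisect.insort(jobs, {'index': index, 'time': time}, key=lambda job: -1 * job['time'])
--         sumOfAllJobs += time
--         index += 1
--     return getJobsAsString(jobs)
-- ===== SOURCE B (Python) =====
-- def getJobsString(j):
--     if j < 1:
--         return '[No jobs]'
--     return '[' + ', '.join('1(' + str(i) + ')' for i in range(1, j + 1)) + ']'
-- ===== Notes on version B (the rewrite author's own statement) =====
-- stated objective: simpler
-- what changed: Builds the result string directly with a join over range(1, j+1), instead of bisect-inserting dicts into a list and then concatenating piece by piece with a first-element flag.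
import Mathlib
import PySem

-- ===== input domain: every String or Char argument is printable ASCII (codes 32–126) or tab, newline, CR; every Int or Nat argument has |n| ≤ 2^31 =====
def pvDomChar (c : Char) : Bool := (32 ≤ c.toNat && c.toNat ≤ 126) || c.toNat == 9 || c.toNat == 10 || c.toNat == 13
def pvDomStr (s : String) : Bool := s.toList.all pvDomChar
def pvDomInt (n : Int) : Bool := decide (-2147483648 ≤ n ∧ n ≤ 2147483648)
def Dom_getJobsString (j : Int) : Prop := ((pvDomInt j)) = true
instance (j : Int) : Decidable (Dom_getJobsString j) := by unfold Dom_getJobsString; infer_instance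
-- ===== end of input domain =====

-- B replaces A's bisect-insert-into-a-list-of-dicts-then-concatenate construction by a direct
-- join over range(1, j+1); objective: simpler.


-- ===== PORT A =====
-- the dict {'index': index, 'time': time}
def pvJobDict (index time : Int) : PySem.Dict String Int :=
  (PySem.Dict.empty.insert "index" index).insert "time" time

-- the key lambda: -1 * job['time'].  'time' is present in every job A builds, so the
-- .getD 0 default is never consulted (Python's KeyError is unreachable here).
def pvJobKey (job : PySem.Dict String Int) : Int := -1 * ((job.get? "time").getD 0)

-- bisect.insort(jobs, job, key=…): position by bisect_right over the keyed values, then list.insert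
def pvInsort (jobs : List (PySem.Dict String Int)) (job : PySem.Dict String Int) :
    List (PySem.Dict String Int) :=
  PySem.List.insert jobs
    ((PySem.List.bisectRight (jobs.map pvJobKey) (pvJobKey job) : Int)) job

-- loop body of getJobsAsString (the string is built as List Char; Python's += on str)
def pvChunk (st : List Char × Bool) (job : PySem.Dict String Int) : List Char × Bool :=
  if st.2 then
    (st.1 ++ PySem.Int.toChars ((job.get? "time").getD 0) ++ ['('] ++
       PySem.Int.toChars ((job.get? "index").getD 0) ++ [')'], false)
  else
    (st.1 ++ [',', ' '] ++ PySem.Int.toChars ((job.get? "time").getD 0) ++ ['('] ++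
       PySem.Int.toChars ((job.get? "index").getD 0) ++ [')'], false)

-- the loop of getJobsAsString: jobs_as_string = '[', is_first_job = True, then the for-loop
def pvChunkFold (jobs : List (PySem.Dict String Int)) : List Char × Bool :=
  jobs.foldl pvChunk (['['], true)

def pvGetJobsAsString (jobs : List (PySem.Dict String Int)) : List Char :=
  (if (pvChunkFold jobs).1 = ['['] then
    (pvChunkFold jobs).1 ++ ('N' :: 'o' :: ' ' :: 'j' :: 'o' :: 'b' :: 's' :: [])
  else (pvChunkFold jobs).1) ++ [']']

def getJobsString (j : Int) : String :=
  String.ofList (pvGetJobsAsString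
    (((PySem.List.pyRange 1 (j + 1) 1).foldl
        (fun (st : List (PySem.Dict String Int) × Int × Int) _i =>
          (pvInsort st.1 (pvJobDict st.2.1 1), st.2.1 + 1, st.2.2 + 1))
        ([], 1, 0)).1))

-- ===== PORT B =====
-- '1(' + str(i) + ')'
def pvPiece (i : Int) : List Char := '1' :: '(' :: PySem.Int.toChars i ++ [')']

def getJobsString_alt (j : Int) : String :=
  if j < 1 then "[No jobs]"
  else String.ofList
    ('[' :: PySem.Chars.join [',', ' ']
        ((PySem.List.pyRange 1 (j + 1) 1).map pvPiece) ++ [']'])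

-- ===== PRECONDITION & SPEC =====
def Spec_getJobsString (j : Int) (out : String) : Prop := out = getJobsString_alt j
instance (j : Int) (out : String) : Decidable (Spec_getJobsString j out) := by unfold Spec_getJobsString; infer_instance

-- ===== CLAIM (what is proved, stated in full; the proofs are below) =====
def Claim_equal_getJobsString : Prop := ∀ (j : Int), Dom_getJobsString j → Spec_getJobsString j (getJobsString j)

-- ===== LEMMAS AND PROOFS =====

theorem pvJobKey_jobDict (idx t : Int) : pvJobKey (pvJobDict idx t) = -1 * t := by
  simp [pvJobKey, pvJobDict, PySem.Dict.get?_insert_self]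

theorem pvGet_time (idx t : Int) : ((pvJobDict idx t).get? "time").getD 0 = t := by
  simp [pvJobDict, PySem.Dict.get?_insert_self]

theorem pvGet_index (idx t : Int) : ((pvJobDict idx t).get? "index").getD 0 = idx := by
  have h : ("index" : String) ≠ "time" := by decide
  rw [pvJobDict, PySem.Dict.get?_insert_of_ne _ _ h, PySem.Dict.get?_insert_self]
  rfl

theorem pvToChars_one : PySem.Int.toChars 1 = ['1'] := by decide

-- with all keys equal (−1), bisect_right lands at the end: insort appends
theorem pvInsort_append (jobs : List (PySem.Dict String Int)) (job : PySem.Dict String Int)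
    (hall : ∀ d ∈ jobs, pvJobKey d = -1) (hjob : pvJobKey job = -1) :
    pvInsort jobs job = jobs ++ [job] := by
  have hmap : jobs.map pvJobKey = List.replicate jobs.length (-1) := by
    rw [show jobs.length = (jobs.map pvJobKey).length by simp]
    apply List.eq_replicate_of_mem
    intro x hx
    obtain ⟨d, hd, rfl⟩ := List.mem_map.mp hx
    exact hall d hd
  have hsorted : (jobs.map pvJobKey).Pairwise (fun a b => a ≤ b) := by
    rw [hmap]; exact List.pairwise_replicate.mpr (Or.inr (le_refl _))
  have hspec := PySem.List.bisectRight_spec (jobs.map pvJobKey) (pvJobKey job) hsorted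
  set pos := PySem.List.bisectRight (jobs.map pvJobKey) (pvJobKey job) with hpos
  have hlen : (jobs.map pvJobKey).length = jobs.length := by simp
  have hple : pos ≤ jobs.length := hlen ▸ hspec.1
  have heq : pos = jobs.length := by
    by_contra hne
    have hlt : pos < jobs.length := lt_of_le_of_ne hple hne
    have hlt' : pos < (jobs.map pvJobKey).length := by omega
    have hgt := hspec.2.2 pos hlt' (le_refl _)
    have hv : (jobs.map pvJobKey)[pos] = -1 := by
      rw [List.getElem_of_eq hmap hlt']
      exact List.getElem_replicate _
    rw [hjob, hv] at hgt
    omega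
  rw [pvInsort, ← hpos, heq]
  rw [PySem.List.insert_natCast jobs jobs.length job (le_refl _)]
  simp

-- the building loop appends one unit-time job per iteration (the loop variable is unused)
theorem pvLoop (l : List Int) (acc : List (PySem.Dict String Int)) (idx s : Int)
    (hacc : ∀ d ∈ acc, pvJobKey d = -1) :
    l.foldl
      (fun (st : List (PySem.Dict String Int) × Int × Int) _i =>
        (pvInsort st.1 (pvJobDict st.2.1 1), st.2.1 + 1, st.2.2 + 1))
      (acc, idx, s)
    = (acc ++ (PySem.List.pyRange idx (idx + l.length) 1).map (fun k => pvJobDict k 1),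
       idx + l.length, s + l.length) := by
  induction l generalizing acc idx s with
  | nil =>
    simp [PySem.List.pyRange_one_eq_nil (le_refl idx)]
  | cons x xs ih =>
    simp only [List.foldl_cons]
    rw [pvInsort_append acc (pvJobDict idx 1) hacc (by rw [pvJobKey_jobDict]; ring)]
    rw [ih (acc ++ [pvJobDict idx 1]) (idx + 1) (s + 1)
      (by intro d hd
          rcases List.mem_append.mp hd with h | h
          · exact hacc d h
          · simp at h; rw [h, pvJobKey_jobDict]; ring)]
    have hr : PySem.List.pyRange idx (idx + (↑xs.length + 1)) 1
        = idx :: PySem.List.pyRange (idx + 1) (idx + 1 + ↑xs.length) 1 := by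
      rw [PySem.List.pyRange_one_cons (by omega)]
      congr 2
      omega
    simp only [List.length_cons]
    push_cast
    rw [hr]
    simp only [List.map_cons, Prod.mk.injEq]
    refine ⟨by simp, by ring, by ring⟩

-- the rest of the A string loop (is_first already false) flattens the ', '-prefixed pieces
theorem pvTail (l : List Int) (cs : List Char) :
    (l.map (fun k => pvJobDict k 1)).foldl pvChunk (cs, false)
    = (cs ++ (l.map (fun i => ',' :: ' ' :: '1' :: '(' :: PySem.Int.toChars i ++ [')'])).flatten,
       false) := by
  induction l generalizing cs with
  | nil => simp
  | cons x xs ih =>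
    simp only [List.map_cons, List.foldl_cons]
    rw [show pvChunk (cs, false) (pvJobDict x 1)
        = (cs ++ (',' :: ' ' :: '1' :: '(' :: PySem.Int.toChars x ++ [')']), false) by
      simp [pvChunk, pvGet_time, pvGet_index, pvToChars_one]]
    rw [ih]
    simp

-- ', '.join(p :: ps) = p ++ flatten of the ', '-prefixed tail pieces
theorem pvJoin_cons (sep p : List Char) (ps : List (List Char)) :
    PySem.Chars.join sep (p :: ps) = p ++ (ps.map (fun q => sep ++ q)).flatten := by
  induction ps generalizing p with
  | nil => simp [PySem.Chars.join, List.intercalate]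
  | cons q qs ih =>
    have h := ih q
    simp only [PySem.Chars.join, List.intercalate] at h ⊢
    rw [show List.intersperse sep (p :: q :: qs) = p :: sep :: List.intersperse sep (q :: qs)
      from rfl]
    simp only [List.flatten_cons, List.map_cons]
    rw [show (List.intersperse sep (q :: qs)).flatten
        = q ++ (qs.map (fun r => sep ++ r)).flatten from h]
    simp

-- ===== VERDICT (by name: the statement is the Claim_ definition above) =====
theorem getJobsString_spec : Claim_equal_getJobsString := by
  intro j _
  unfold Spec_getJobsString getJobsString getJobsString_alt
  by_cases hj : j < 1
  · rw [PySem.List.pyRange_one_eq_nil (by omega), if_pos hj]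
    decide
  · rw [not_lt] at hj
    rw [if_neg (by omega)]
    rw [pvLoop (PySem.List.pyRange 1 (j + 1) 1) [] 1 0 (by intro d hd; simp at hd)]
    simp only [List.nil_append]
    have hlen : (1 : Int) + ↑(PySem.List.pyRange 1 (j + 1) 1).length = j + 1 := by
      rw [PySem.List.length_pyRange_one]; omega
    rw [hlen]
    have hcons : PySem.List.pyRange 1 (j + 1) 1 = 1 :: PySem.List.pyRange 2 (j + 1) 1 := by
      rw [PySem.List.pyRange_one_cons (by omega)]
      norm_num
    rw [hcons]
    simp only [List.map_cons]
    unfold pvGetJobsAsString pvChunkFold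
    simp only [List.foldl_cons]
    rw [show pvChunk (['['], true) (pvJobDict 1 1)
        = ('[' :: '1' :: '(' :: '1' :: ')' :: [], false) by
      simp [pvChunk, pvGet_time, pvGet_index, pvToChars_one]]
    rw [pvTail]
    rw [pvJoin_cons [',', ' '] (pvPiece 1) ((PySem.List.pyRange 2 (j + 1) 1).map pvPiece)]
    rw [if_neg (by simp)]
    congr 1
    simp [pvPiece, pvToChars_one, List.map_map, Function.comp_def]
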